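-- pv_equiv track=rewrite | github.com/vipansegrouw/provisionerTokensTool | src/gui.py | _format_price_as_currency
-- ===== SOURCE A (Python) =====
-- def _format_price_as_currency(text: str) -> str:
--     """
--     Formats a price as in game with gold, silver, and copper delimiters
--     :param text: str of the price of an item
--     :return: str formatted with gold, silver and copper delimiters
--     """
--     text = str(text)
--     text = text[::-1]
--     string = "c"
--     for idx, character in enumerate(text):
--         if idx == 2:
--             string += "s"
--         if idx == 4:
--             string += "g"
--         string += character
--     return string[::-1]
-- ===== SOURCE B (Python) =====
-- def _format_price_as_currency(text: str) -> str:
--     s = str(text)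
--     n = len(s)
--     return (s[:-4] + ('g' if n >= 5 else '')
--             + s[-4:-2] + ('s' if n >= 3 else '')
--             + s[-2:] + 'c')
-- ===== Notes on version B (the rewrite author's own statement) =====
-- stated objective: simpler
-- what changed: Replaced A's two full string reversals and per-character enumerate loop that inserts delimiters at fixed indices with three right-anchored slices (gold/silver/copper) concatenated with length-gated delimiter letters.
import Mathlib
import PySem

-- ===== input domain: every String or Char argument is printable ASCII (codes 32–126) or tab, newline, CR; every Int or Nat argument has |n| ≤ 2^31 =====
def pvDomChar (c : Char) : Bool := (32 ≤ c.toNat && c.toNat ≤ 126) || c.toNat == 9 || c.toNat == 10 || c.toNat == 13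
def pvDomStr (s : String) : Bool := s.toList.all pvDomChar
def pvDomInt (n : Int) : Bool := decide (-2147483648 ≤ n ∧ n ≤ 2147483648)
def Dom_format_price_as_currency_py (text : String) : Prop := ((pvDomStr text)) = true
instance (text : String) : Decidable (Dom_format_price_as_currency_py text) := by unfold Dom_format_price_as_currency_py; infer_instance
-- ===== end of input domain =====

-- B replaces A's double string reversal and character-by-character delimiter loop with three
-- right-anchored slices joined by length-gated delimiters (objective: simpler).

-- ===== PORT A =====
-- the loop body: at index 2 append 's', at index 4 append 'g', then the character
def pvStepA (acc : List Char) (p : Int × Char) : List Char :=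
  let acc := if p.1 = 2 then acc ++ ['s'] else acc
  let acc := if p.1 = 4 then acc ++ ['g'] else acc
  acc ++ [p.2]

def format_price_as_currency_py (text : String) : String :=
  -- text = text[::-1]  (s[::-1] is reverse: PySem.List.slice?_none_none_neg_one)
  let rev := text.toList.reverse
  -- string = "c"; for idx, character in enumerate(text): …
  let s := (PySem.List.enumerate rev 0).foldl pvStepA ['c']
  -- return string[::-1]
  String.ofList s.reverse

-- ===== PORT B =====
def format_price_as_currency_py_alt (text : String) : String :=
  let s := text.toList
  let n := s.length
  String.ofList (PySem.List.slice s none (some (-4))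
    ++ (if 5 ≤ n then ['g'] else [])
    ++ PySem.List.slice s (some (-4)) (some (-2))
    ++ (if 3 ≤ n then ['s'] else [])
    ++ PySem.List.slice s (some (-2)) none
    ++ ['c'])

-- ===== PRECONDITION & SPEC =====
def Spec_format_price_as_currency_py (text : String) (out : String) : Prop := out = format_price_as_currency_py_alt text
instance (text : String) (out : String) : Decidable (Spec_format_price_as_currency_py text out) := by unfold Spec_format_price_as_currency_py; infer_instance

-- ===== CLAIM (what is proved, stated in full; the proofs are below) =====
def Claim_equal_format_price_as_currency_py : Prop := ∀ (text : String), Dom_format_price_as_currency_py text → Spec_format_price_as_currency_py text (format_price_as_currency_py text)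

-- ===== LEMMAS AND PROOFS =====

-- for indices ≥ 5 the loop of A only appends the characters
theorem pv_loop_tail (t : List Char) (k : Int) (hk : 5 ≤ k) (acc : List Char) :
    (PySem.List.enumerate t k).foldl pvStepA acc = acc ++ t := by
  induction t generalizing k acc with
  | nil => simp [PySem.List.enumerate_nil]
  | cons x xs ih =>
      rw [PySem.List.enumerate_cons, List.foldl_cons, ih (k + 1) (by omega)]
      simp only [pvStepA]
      rw [if_neg (by omega : ¬ k = 2), if_neg (by omega : ¬ k = 4)]
      simp

-- the list-level equivalence, by cases on the reversed character list
theorem pv_main (s : List Char) :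
    ((PySem.List.enumerate s.reverse 0).foldl pvStepA ['c']).reverse =
      PySem.List.slice s none (some (-4))
        ++ (if 5 ≤ s.length then ['g'] else [])
        ++ PySem.List.slice s (some (-4)) (some (-2))
        ++ (if 3 ≤ s.length then ['s'] else [])
        ++ PySem.List.slice s (some (-2)) none
        ++ ['c'] := by
  rw [← List.reverse_reverse s]
  generalize s.reverse = r
  rcases r with _ | ⟨x0, _ | ⟨x1, _ | ⟨x2, _ | ⟨x3, _ | ⟨x4, t⟩⟩⟩⟩⟩
  · simp [PySem.List.enumerate_nil, PySem.List.slice]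
  · simp [PySem.List.enumerate_cons, PySem.List.enumerate_nil, pvStepA, PySem.List.slice]
  · simp [PySem.List.enumerate_cons, PySem.List.enumerate_nil, pvStepA, PySem.List.slice]
  · simp [PySem.List.enumerate_cons, PySem.List.enumerate_nil, pvStepA, PySem.List.slice]
  · simp [PySem.List.enumerate_cons, PySem.List.enumerate_nil, pvStepA, PySem.List.slice]
  · -- length ≥ 5
    rw [List.reverse_reverse]
    simp only [PySem.List.enumerate_cons, List.foldl_cons]
    rw [show (0+1+1+1+1+1 : Int) = 5 by norm_num, pv_loop_tail t 5 (by norm_num)]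
    have hlen : (x0::x1::x2::x3::x4::t : List Char).length = t.length + 5 := by simp
    have hn : (x0::x1::x2::x3::x4::t : List Char).reverse.length = t.length + 5 := by simp
    rw [PySem.List.slice_to_neg_ofNat _ 4 (by omega), PySem.List.slice_from_neg_ofNat _ 2 (by omega)]
    rw [hn, if_pos (by omega : 5 ≤ t.length + 5), if_pos (by omega : 3 ≤ t.length + 5),
        (by omega : t.length + 5 - 4 = t.length + 1), (by omega : t.length + 5 - 2 = t.length + 3)]
    have hmid : PySem.List.slice ((x0::x1::x2::x3::x4::t : List Char).reverse) (some (-4)) (some (-2)) =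
        (((x0::x1::x2::x3::x4::t : List Char).reverse).drop (t.length + 1)).take 2 := by
      simp [PySem.List.slice]
    rw [hmid, List.take_reverse, List.drop_reverse, List.drop_reverse, hlen,
        (by omega : t.length + 5 - (t.length + 1) = 4), (by omega : t.length + 5 - (t.length + 3) = 2)]
    simp [pvStepA]

-- ===== VERDICT (by name: the statement is the Claim_ definition above) =====
theorem format_price_as_currency_py_spec : Claim_equal_format_price_as_currency_py := by
  intro text _
  show _ = _
  unfold format_price_as_currency_py format_price_as_currency_py_alt
  exact congrArg String.ofList (pv_main text.toList)
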